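-- pv_equiv track=rewrite | github.com/mikolajamikolaja/AutoResponder_AI_Text | responders/emocje.py | _aggregate_hits
-- ===== SOURCE A (Python) =====
-- def _aggregate_hits(para_rows: list, cats: dict) -> dict:
--     """Zbiera unikalne słowa-przykłady dla każdej kategorii."""
--     hits = {label: [] for label in cats}
--     for row in para_rows:
--         for label in cats:
--             hits[label] += row.get(label + "__hits", [])
--     # deduplikacja, zachowaj kolejność
--     unique = {}
--     for label in cats:
--         seen = set()
--         uniq = []
--         for w in hits[label]:
--             wl = w.lower()
--             if wl not in seen:
--                 seen.add(wl)
--                 uniq.append(w)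
--         unique[label] = uniq[:10]
--     return unique
-- ===== SOURCE B (Python) =====
-- def _aggregate_hits(para_rows: list, cats: dict) -> dict:
--     """One fused pass per label: stream words with a 10-cap and dedup on the fly,
--     with no intermediate aggregation lists and no final slice."""
--     unique = {}
--     for label in cats:
--         key = label + "__hits"
--         seen = set()
--         uniq = []
--         for row in para_rows:
--             if len(uniq) >= 10:
--                 break
--             for w in row.get(key, []):
--                 if len(uniq) >= 10:
--                     break
--                 wl = w.lower()
--                 if wl not in seen:
--                     seen.add(wl)
--                     uniq.append(w)
--         unique[label] = uniq
--     return unique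
-- ===== Notes on version B (the rewrite author's own statement) =====
-- stated objective: alternative
-- what changed: B removes the intermediate per-label `hits` aggregation dict and the separate dedup+slice passes: for each label it streams the rows' hit lists once, deduplicating case-insensitively on the fly and stopping early at the 10-item cap, so no throwaway concatenated lists are built.
import Mathlib
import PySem

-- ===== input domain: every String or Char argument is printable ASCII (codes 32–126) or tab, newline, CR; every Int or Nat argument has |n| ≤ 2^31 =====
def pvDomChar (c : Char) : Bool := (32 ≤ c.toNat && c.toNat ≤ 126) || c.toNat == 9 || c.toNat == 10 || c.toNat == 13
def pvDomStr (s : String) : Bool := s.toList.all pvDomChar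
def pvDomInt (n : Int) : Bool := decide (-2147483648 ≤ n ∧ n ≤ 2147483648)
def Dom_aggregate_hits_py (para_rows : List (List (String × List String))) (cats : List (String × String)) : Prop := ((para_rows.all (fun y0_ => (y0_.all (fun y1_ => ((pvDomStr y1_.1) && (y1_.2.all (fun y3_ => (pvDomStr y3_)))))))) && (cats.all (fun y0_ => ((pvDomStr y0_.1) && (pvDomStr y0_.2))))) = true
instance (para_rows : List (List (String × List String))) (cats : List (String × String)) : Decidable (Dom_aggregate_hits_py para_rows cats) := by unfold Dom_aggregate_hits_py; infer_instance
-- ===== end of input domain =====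

-- B removes A's intermediate `hits` aggregation and the separate dedup + slice passes: one fused streaming
-- pass per label with an early 10-cap (objective: alternative decomposition, same results).

-- ===== PORT A =====
-- body of A's inner dedup loop ("for w in hits[label]: ...")
def pvDedupStep (p : PySem.Set String × List String) (w : String) : PySem.Set String × List String :=
  let wl := PySem.Str.lower w
  if PySem.Set.contains p.1 wl then p else (PySem.Set.add p.1 wl, p.2 ++ [w])

def aggregate_hits_py (para_rows : List (List (String × List String))) (cats : List (String × String)) : List (String × List String) :=
  let labels := (PySem.Dict.ofList cats).keys
  let hits0 : PySem.Dict String (List String) := labels.foldl (fun d label => d.insert label []) PySem.Dict.empty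
  let hits := para_rows.foldl (fun d row =>
    labels.foldl (fun d label =>
      d.modify label [] (fun v => v ++ (PySem.Dict.ofList row).getD (label ++ "__hits") [])) d) hits0
  let unique := labels.foldl (fun u label =>
    u.insert label ((((hits.getD label []).foldl pvDedupStep ((PySem.Set.empty : PySem.Set String), ([] : List String))).2).take 10)) PySem.Dict.empty
  unique.items

-- ===== PORT B =====
-- body of B's inner word loop, with the `break` at the 10-cap transliterated as a skip
def pvCappedStep (q : PySem.Set String × List String) (w : String) : PySem.Set String × List String :=
  if 10 ≤ q.2.length then q
  else
    let wl := PySem.Str.lower w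
    if PySem.Set.contains q.1 wl then q else (PySem.Set.add q.1 wl, q.2 ++ [w])

def aggregate_hits_py_alt (para_rows : List (List (String × List String))) (cats : List (String × String)) : List (String × List String) :=
  ((PySem.Dict.ofList cats).keys.foldl (fun u label =>
    let key := label ++ "__hits"
    u.insert label ((para_rows.foldl (fun p row =>
      if 10 ≤ p.2.length then p
      else ((PySem.Dict.ofList row).getD key []).foldl pvCappedStep p)
      ((PySem.Set.empty : PySem.Set String), ([] : List String))).2))
    PySem.Dict.empty).items

-- ===== PRECONDITION & SPEC =====
def Spec_aggregate_hits_py (para_rows : List (List (String × List String))) (cats : List (String × String)) (out : List (String × List String)) : Prop := out = aggregate_hits_py_alt para_rows cats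
instance (para_rows : List (List (String × List String))) (cats : List (String × String)) (out : List (String × List String)) : Decidable (Spec_aggregate_hits_py para_rows cats out) := by unfold Spec_aggregate_hits_py; infer_instance

-- ===== CLAIM (what is proved, stated in full; the proofs are below) =====
def Claim_equal_aggregate_hits_py : Prop := ∀ (para_rows : List (List (String × List String))) (cats : List (String × String)), Dom_aggregate_hits_py para_rows cats → Spec_aggregate_hits_py para_rows cats (aggregate_hits_py para_rows cats)

-- ===== LEMMAS AND PROOFS =====

-- the init dict {label: [] for label in cats} stores only [] , so getD _ [] is []
theorem getD_init (labels : List String) (d : PySem.Dict String (List String)) (x : String)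
    (h : d.getD x [] = []) :
    (labels.foldl (fun d label => d.insert label []) d).getD x [] = [] := by
  induction labels generalizing d with
  | nil => simpa using h
  | cons a labels ih =>
    simp only [List.foldl_cons]
    exact ih _ (by rw [PySem.Dict.getD_insert]; split <;> simp [h])

-- one row's pass over the labels appends exactly g l to slot l
theorem getD_row (labels : List String) (g : String → List String)
    (l : String) (hnd : labels.Nodup) (hl : l ∈ labels) (d : PySem.Dict String (List String)) :
    (labels.foldl (fun d label => d.modify label [] (fun v => v ++ g label)) d).getD l []
      = d.getD l [] ++ g l := by
  induction labels generalizing d with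
  | nil => cases hl
  | cons a labels ih =>
    obtain ⟨ha, hnd'⟩ := List.nodup_cons.mp hnd
    simp only [List.foldl_cons]
    rcases List.mem_cons.mp hl with rfl | hl'
    · -- l = a; the rest of the labels never touch slot l
      have fix : ∀ (labels' : List String) (d : PySem.Dict String (List String)),
          l ∉ labels' →
          (labels'.foldl (fun d label => d.modify label [] (fun v => v ++ g label)) d).getD l []
            = d.getD l [] := by
        intro labels' d' hnot
        induction labels' generalizing d' with
        | nil => rfl
        | cons b labels' ih2 =>
          simp only [List.foldl_cons]
          have hlb : l ≠ b := by rintro rfl; exact hnot (List.mem_cons_self ..)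
          rw [ih2 _ (fun h => hnot (List.mem_cons_of_mem _ h)),
            PySem.Dict.getD_modify_of_ne _ _ _ hlb]
      rw [fix labels _ ha, PySem.Dict.getD_modify_self]
    · have hne : l ≠ a := fun h => ha (h ▸ hl')
      rw [ih hnd' hl' _, PySem.Dict.getD_modify_of_ne _ _ _ hne]

-- the whole aggregation loop: slot l holds the concatenation of the rows' hit lists
theorem getD_rows (rows : List (List (String × List String))) (labels : List String)
    (g : List (String × List String) → String → List String)
    (l : String) (hnd : labels.Nodup) (hl : l ∈ labels) (d : PySem.Dict String (List String)) :
    (rows.foldl (fun d row =>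
        labels.foldl (fun d label => d.modify label [] (fun v => v ++ g row label)) d) d).getD l []
      = d.getD l [] ++ (rows.map (fun row => g row l)).flatten := by
  induction rows generalizing d with
  | nil => simp
  | cons r rows ih =>
    simp only [List.foldl_cons, List.map_cons, List.flatten_cons]
    rw [ih _, getD_row labels (g r) l hnd hl d, List.append_assoc]

-- once the cap is reached, the capped loop is stationary
theorem capped_fix (ws : List String) (p : PySem.Set String × List String)
    (h : 10 ≤ p.2.length) : ws.foldl pvCappedStep p = p := by
  induction ws with
  | nil => rfl
  | cons w ws ih => simp [pvCappedStep, h, ih]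

-- B's row loop (with its redundant outer cap check) is the capped loop over the flattened hits
theorem outerB (rows : List (List (String × List String))) (W : List (String × List String) → List String)
    (p : PySem.Set String × List String) :
    rows.foldl (fun p row => if 10 ≤ p.2.length then p else (W row).foldl pvCappedStep p) p
      = ((rows.map W).flatten).foldl pvCappedStep p := by
  induction rows generalizing p with
  | nil => rfl
  | cons r rows ih =>
    simp only [List.foldl_cons, List.map_cons, List.flatten_cons, List.foldl_append]
    split
    · next h => rw [capped_fix (W r) p h, ih]
    · rw [ih]

-- the uncapped dedup loop only appends to the accumulator
theorem dedup_prefix (ws : List String) (st : PySem.Set String × List String) :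
    ∃ t, (ws.foldl pvDedupStep st).2 = st.2 ++ t := by
  induction ws generalizing st with
  | nil => exact ⟨[], by simp⟩
  | cons w ws ih =>
    simp only [List.foldl_cons, pvDedupStep]
    split
    · exact ih st
    · obtain ⟨t, ht⟩ := ih (PySem.Set.add st.1 (PySem.Str.lower w), st.2 ++ [w])
      exact ⟨w :: t, by simpa [List.append_assoc] using ht⟩

-- main loop lemma: take 10 of A's dedup loop = B's capped loop
theorem take_capped (ws : List String) (s : PySem.Set String) (u : List String)
    (h : u.length ≤ 10) :
    ((ws.foldl pvDedupStep (s, u)).2).take 10 = (ws.foldl pvCappedStep (s, u)).2 := by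
  induction ws generalizing s u with
  | nil => exact List.take_of_length_le h
  | cons w ws ih =>
    simp only [List.foldl_cons]
    by_cases hc : 10 ≤ u.length
    · have h10 : u.length = 10 := le_antisymm h hc
      have hr : (ws.foldl pvCappedStep (pvCappedStep (s, u) w)).2 = u := by
        simp only [pvCappedStep, hc, if_pos]
        rw [capped_fix _ _ hc]
      obtain ⟨t0, ht0⟩ : ∃ t0, (pvDedupStep (s, u) w).2 = u ++ t0 := by
        simp only [pvDedupStep]
        split
        · exact ⟨[], by simp⟩
        · exact ⟨[w], rfl⟩
      obtain ⟨t, ht⟩ := dedup_prefix ws (pvDedupStep (s, u) w)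
      rw [hr, ht, ht0, List.append_assoc, ← h10, List.take_left]
    · have hc' : u.length < 10 := lt_of_not_ge hc
      simp only [pvDedupStep, pvCappedStep, hc]
      split
      · exact ih s u h
      · exact ih _ (u ++ [w]) (by simp; omega)

-- the final dicts are label-indexed maps over the same nodup label list
theorem items_build (labels : List String) (v : String → List String) (hnd : labels.Nodup) :
    (labels.foldl (fun u label => u.insert label (v label)) PySem.Dict.empty).items
      = labels.map (fun l => (l, v l)) := by
  have := PySem.Dict.items_foldl_insert_fresh (l := labels) (k := fun a => a) (v := v)
    (d := PySem.Dict.empty) (fun a _ => PySem.Dict.contains_empty a) (by simpa using hnd)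
  simpa using this

-- ===== VERDICT (by name: the statement is the Claim_ definition above) =====
theorem aggregate_hits_py_spec : Claim_equal_aggregate_hits_py := by
  intro para_rows cats _
  unfold Spec_aggregate_hits_py aggregate_hits_py aggregate_hits_py_alt
  have hnd : ((PySem.Dict.ofList cats).keys).Nodup := PySem.Dict.nodup_keys_ofList cats
  rw [items_build _ _ hnd, items_build _ _ hnd]
  apply List.map_congr_left
  intro l hl
  have hflat := getD_rows para_rows ((PySem.Dict.ofList cats).keys)
    (fun row label => (PySem.Dict.ofList row).getD (label ++ "__hits") []) l hnd hl
    (((PySem.Dict.ofList cats).keys).foldl (fun d label => d.insert label []) PySem.Dict.empty)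
  rw [getD_init _ _ _ (by simp [PySem.Dict.getD_empty])] at hflat
  simp only [List.nil_append] at hflat
  rw [hflat, take_capped _ _ _ (by simp), outerB]
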